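-- pv_equiv track=rewrite | github.com/rybickibartek/sentione | split_sentence.py | improvePartitioning
-- ===== SOURCE A (Python) =====
-- def howManyVerbsSentenceContains(sentence):
--     # zliczanie czasowników w zdaniu
--     count = 0
--     for (word, pos) in sentence:
--         if pos == 'verb':
--             count += 1
--     return count
--
-- def containsVerb(sentence):
--     # określanie czy zdanie zawiera choć jeden czasownik
--     return howManyVerbsSentenceContains(sentence) > 0
--
-- def cutAfterVerbs(sentence, verbsCount):
--     # cięcie kandydatów na zdania proste, którzy zawierają więcej niż jeden czasownik na zdania proste
--     sentences = [[]]
--     cuts = 0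
--     for (word, pos) in sentence:
--         sentences[-1].append((word, pos))
--         if pos == 'verb' and cuts < verbsCount - 1:
--             sentences.append([])
--             cuts += 1
--
--     if sentences[-1] == []:
--         sentences = sentences[:-1]
--     return sentences
--
-- def solveProblemWithMoreThanOneVerb(partition):
--     # wybranie zdań kandydatów, którzy mają więcej niż jeden czasownik i rozwiązanie tego problemu
--     simpleSentences = []
--     for sentence in partition:
--         verbsCount = howManyVerbsSentenceContains(sentence)
--         if verbsCount > 1:
--             simpleSentences.extend(cutAfterVerbs(sentence, verbsCount))
--         else:
--             simpleSentences.append(sentence)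
--     return simpleSentences
--
-- def improvePartitioning(partition):
--     # jeśli w wyniku dzielenia po spójniku powstały zdania które nie mają orzeczenia to trzeba je skleić z jakimś zdaniem sąsiednim
--     improvedPartition = [partition[0]]
--     for simpleSentence in partition[1:]:
--         if containsVerb(simpleSentence) and containsVerb(improvedPartition[-1]):
--             improvedPartition.append(simpleSentence)
--         else:
--             improvedPartition[-1].extend(simpleSentence)
--
--     for i, simpleSentence in enumerate(improvedPartition):
--         if simpleSentence[-1][1] == 'conj':
--             improvedPartition[i] = simpleSentence[:-1]
--
--     improvedPartition = solveProblemWithMoreThanOneVerb(improvedPartition)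
--
--     return improvedPartition
-- ===== SOURCE B (Python) =====
-- def improvePartitioning(partition):
--     # B first computes every cut position (group boundaries from verb flags, then
--     # per-group verb positions), and only then materialises the result by slicing;
--     # A instead rebuilds the lists token by token while deciding where to cut.
--     flags = [any(p == 'verb' for _, p in s) for s in partition]
--     bounds = [0]
--     seen = False
--     for i, f in enumerate(flags):
--         if i > 0 and seen and f:
--             bounds.append(i)
--         seen = seen or f
--     bounds.append(len(partition))
--     out = []
--     for lo, hi in zip(bounds, bounds[1:]):
--         toks = [t for s in partition[lo:hi] for t in s]
--         if toks[-1][1] == 'conj':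
--             toks = toks[:-1]
--         vpos = [i for i, (_, p) in enumerate(toks) if p == 'verb']
--         if len(vpos) > 1:
--             cuts = [0] + [i + 1 for i in vpos[:-1]] + [len(toks)]
--             out += [toks[a:b] for a, b in zip(cuts, cuts[1:])]
--         else:
--             out.append(toks)
--     return out
-- ===== Notes on version B (the rewrite author's own statement) =====
-- stated objective: alternative
-- what changed: B separates deciding from building: it first computes all cut positions as plain indices (group boundaries from per-sentence verb flags, then per-group verb positions) and only then materialises the result by slicing, whereas A rebuilds the lists token by token, deciding merges and cuts while mutating the last accumulated list; Pre_ excludes the inputs (empty partition or all sentences empty) on which A raises IndexError.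
import Mathlib
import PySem

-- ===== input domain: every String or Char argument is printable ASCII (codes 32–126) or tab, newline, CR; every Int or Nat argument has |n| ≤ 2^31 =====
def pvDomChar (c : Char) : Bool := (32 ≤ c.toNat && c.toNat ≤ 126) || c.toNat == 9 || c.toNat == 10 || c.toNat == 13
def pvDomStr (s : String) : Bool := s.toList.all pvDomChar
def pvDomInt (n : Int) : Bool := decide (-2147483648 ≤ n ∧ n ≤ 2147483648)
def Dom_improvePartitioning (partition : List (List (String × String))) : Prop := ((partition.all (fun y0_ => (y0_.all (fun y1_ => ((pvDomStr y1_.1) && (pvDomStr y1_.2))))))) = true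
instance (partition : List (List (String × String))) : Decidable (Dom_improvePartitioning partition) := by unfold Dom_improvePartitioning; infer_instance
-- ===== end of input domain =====

-- B computes every cut position first (group boundaries from per-sentence verb flags, then
-- per-group verb positions) and materialises the result by slicing, instead of A's token-by-token
-- rebuilding with mutation of the last accumulated list (objective: alternative, same cost).
-- Equivalence is about the RETURN value only: Python A mutates its argument's inner lists in
-- place (extend), B does not.

-- ===== PORT A =====
-- howManyVerbsSentenceContains
def pvHowMany (s : List (String × String)) : Int :=
  s.foldl (fun c wp => if wp.2 == "verb" then c + 1 else c) 0

-- containsVerb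
def pvContainsVerb (s : List (String × String)) : Bool :=
  pvHowMany s > 0

-- sentences[-1].append(wp) on a nonempty list-of-lists
def pvAppendLast (acc : List (List (String × String))) (wp : String × String) :
    List (List (String × String)) :=
  acc.dropLast ++ [acc.getLast?.getD [] ++ [wp]]

-- improvedPartition[-1].extend(s) on a nonempty list-of-lists
def pvExtendLast (acc : List (List (String × String))) (s : List (String × String)) :
    List (List (String × String)) :=
  acc.dropLast ++ [acc.getLast?.getD [] ++ s]

-- cutAfterVerbs
def cutAfterVerbs (s : List (String × String)) (verbsCount : Int) :
    List (List (String × String)) :=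
  let p := s.foldl (fun (acc : List (List (String × String)) × Int) wp =>
      let sentences := pvAppendLast acc.1 wp
      if wp.2 == "verb" && decide (acc.2 < verbsCount - 1) then (sentences ++ [[]], acc.2 + 1)
      else (sentences, acc.2)) ([[]], 0)
  if p.1.getLast? = some [] then p.1.dropLast else p.1

-- solveProblemWithMoreThanOneVerb
def solveProblem (partition : List (List (String × String))) :
    List (List (String × String)) :=
  partition.foldl (fun acc s =>
    let vc := pvHowMany s
    if vc > 1 then acc ++ cutAfterVerbs s vc else acc ++ [s]) []

-- s[:-1] if s[-1][1] == 'conj' else s  (Python A raises IndexError on s = []; those inputs are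
-- outside Pre_; the 'none' branch is the arbitrary total completion)
def pvTrim (s : List (String × String)) : List (String × String) :=
  match s.getLast? with
  | some wp => if wp.2 == "conj" then s.dropLast else s
  | none => s

def improvePartitioning (partition : List (List (String × String))) :
    List (List (String × String)) :=
  match partition with
  | [] => []  -- Python raises IndexError on partition[0]; excluded by Pre_
  | first :: rest =>
    let improved := rest.foldl (fun acc s =>
        if pvContainsVerb s && pvContainsVerb (acc.getLast?.getD []) then acc ++ [s]
        else pvExtendLast acc s) [first]
    let trimmed := improved.map pvTrim
    solveProblem trimmed

-- ===== PORT B =====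
-- flags = [any(p == 'verb' for _, p in s) for s in partition]
def altFlags (partition : List (List (String × String))) : List Bool :=
  partition.map (fun s => s.any (fun wp => wp.2 == "verb"))

-- the bounds loop: 'for i, f in enumerate(flags): if i > 0 and seen and f: bounds.append(i); seen = seen or f'
def altBoundsCore (flags : List Bool) : List Int × Bool :=
  (PySem.List.enumerate flags 0).foldl
    (fun (st : List Int × Bool) p =>
      ((if decide (p.1 > 0) && st.2 && p.2 then st.1 ++ [p.1] else st.1), st.2 || p.2))
    ([0], false)

def improvePartitioning_alt (partition : List (List (String × String))) :
    List (List (String × String)) :=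
  let flags := altFlags partition
  let bounds := (altBoundsCore flags).1 ++ [(partition.length : Int)]
  -- bounds[1:] is bounds.drop 1
  (bounds.zip (bounds.drop 1)).foldl (fun out lohi =>
    -- toks = [t for s in partition[lo:hi] for t in s]
    let toks := (PySem.List.slice partition (some lohi.1) (some lohi.2)).flatMap id
    -- 'toks[:-1] if toks[-1][1] == "conj" else toks' (same trim step as A: shared helper pvTrim;
    -- toks[-1] raises on [] in Python, outside Pre_)
    let toks := pvTrim toks
    -- vpos = [i for i, (_, p) in enumerate(toks) if p == 'verb']
    let vpos := ((PySem.List.enumerate toks 0).filter (fun ip => ip.2.2 == "verb")).map (fun ip => ip.1)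
    if 1 < vpos.length then
      -- cuts = [0] + [i + 1 for i in vpos[:-1]] + [len(toks)]
      let cuts := [(0 : Int)] ++ vpos.dropLast.map (· + 1) ++ [(toks.length : Int)]
      out ++ (cuts.zip (cuts.drop 1)).map (fun ab => PySem.List.slice toks (some ab.1) (some ab.2))
    else out ++ [toks]) []

-- ===== PRECONDITION & SPEC =====
-- Pre_ excludes exactly the inputs where Python A raises IndexError: an empty partition
-- (partition[0]) or one whose sentences are all empty (the single merged sentence is empty
-- and sentence[-1] raises in the conj-trim loop).
def Pre_improvePartitioning (partition : List (List (String × String))) : Prop :=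
  ∃ s ∈ partition, s ≠ []
instance (partition : List (List (String × String))) : Decidable (Pre_improvePartitioning partition) := by unfold Pre_improvePartitioning; infer_instance

def pvWitness_improvePartitioning : (List (List (String × String))) :=
  [[("ala", "noun"), ("biega", "verb")]]

def Spec_improvePartitioning (partition : List (List (String × String))) (out : List (List (String × String))) : Prop := out = improvePartitioning_alt partition
instance (partition : List (List (String × String))) (out : List (List (String × String))) : Decidable (Spec_improvePartitioning partition out) := by unfold Spec_improvePartitioning; infer_instance

-- ===== CLAIM (what is proved, stated in full; the proofs are below) =====
def Claim_equal_improvePartitioning : Prop := ∀ (partition : List (List (String × String))), Dom_improvePartitioning partition → Pre_improvePartitioning partition → Spec_improvePartitioning partition (improvePartitioning partition)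

-- ===== LEMMAS AND PROOFS =====

-- verb count as a countP (shared yardstick of both proofs)
def cntV (s : List (String × String)) : Nat := s.countP (fun wp => wp.2 == "verb")

theorem pvHowMany_eq_cntV (s : List (String × String)) : pvHowMany s = (cntV s : Int) := by
  unfold pvHowMany cntV
  simpa using PySem.List.foldl_count_if (fun wp => wp.2 == "verb") s 0

theorem pvContainsVerb_eq_any (s : List (String × String)) :
    pvContainsVerb s = s.any (fun wp => wp.2 == "verb") := by
  rw [Bool.eq_iff_iff]
  simp [pvContainsVerb, pvHowMany_eq_cntV, cntV, List.countP_pos_iff]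

theorem pvContainsVerb_append (a b : List (String × String)) :
    pvContainsVerb (a ++ b) = (pvContainsVerb a || pvContainsVerb b) := by
  simp [pvContainsVerb_eq_any]

-- prepend a prefix onto the first piece
def consOnto (pre : List (String × String)) :
    List (List (String × String)) → List (List (String × String))
  | [] => [pre]
  | o :: os => (pre ++ o) :: os

-- structural mediator: cut after each of the first k verbs
def splitRec : List (String × String) → Nat → List (List (String × String))
  | toks, 0 => [toks]
  | [], _ + 1 => [[]]
  | t :: r, k + 1 =>
    if t.2 == "verb" then [t] :: splitRec r k else consOnto [t] (splitRec r (k + 1))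

theorem splitRec_ne_nil (toks : List (String × String)) (k : Nat) : splitRec toks k ≠ [] := by
  unfold splitRec
  match toks, k with
  | toks, 0 => simp
  | [], _ + 1 => simp
  | t :: r, k + 1 =>
    by_cases h : (t.2 == "verb") = true
    · simp [h]
    · simp only [h, Bool.false_eq_true, if_false]
      cases splitRec r (k + 1) <;> simp [consOnto]

theorem consOnto_nil (ls : List (List (String × String))) (h : ls ≠ []) :
    consOnto [] ls = ls := by
  cases ls with
  | nil => exact absurd rfl h
  | cons o os => simp [consOnto]

theorem consOnto_consOnto (p q : List (String × String)) (ls : List (List (String × String))) :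
    consOnto p (consOnto q ls) = consOnto (p ++ q) ls := by
  cases ls <;> simp [consOnto]

-- ---- A side: cutAfterVerbs is splitRec ----

theorem pvAppendLast_snoc (u : List (List (String × String))) (v : List (String × String))
    (w : String × String) : pvAppendLast (u ++ [v]) w = u ++ [v ++ [w]] := by
  simp [pvAppendLast]

theorem pvExtendLast_snoc (u : List (List (String × String))) (v s : List (String × String)) :
    pvExtendLast (u ++ [v]) s = u ++ [v ++ s] := by
  simp [pvExtendLast]

theorem cutfold_nocut (vc : Int) (toks : List (String × String))
    (done : List (List (String × String))) (piece : List (String × String)) (cuts : Int)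
    (h : vc - 1 ≤ cuts) :
    toks.foldl (fun (acc : List (List (String × String)) × Int) wp =>
      let sentences := pvAppendLast acc.1 wp
      if wp.2 == "verb" && decide (acc.2 < vc - 1) then (sentences ++ [[]], acc.2 + 1)
      else (sentences, acc.2)) (done ++ [piece], cuts) = (done ++ [piece ++ toks], cuts) := by
  induction toks generalizing piece with
  | nil => simp
  | cons t r ih =>
    simp only [List.foldl_cons, pvAppendLast_snoc]
    have : (decide (cuts < vc - 1)) = false := by simp; omega
    simp only [this, Bool.and_false, Bool.false_eq_true, if_false]
    rw [ih (piece ++ [t])]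
    simp

theorem cutfold_main (vc : Int) (toks : List (String × String))
    (done : List (List (String × String))) (piece : List (String × String)) (cuts : Int)
    (h1 : cuts ≤ vc - 1) (h2 : (cntV toks : Int) = vc - cuts) :
    (let p := toks.foldl (fun (acc : List (List (String × String)) × Int) wp =>
        let sentences := pvAppendLast acc.1 wp
        if wp.2 == "verb" && decide (acc.2 < vc - 1) then (sentences ++ [[]], acc.2 + 1)
        else (sentences, acc.2)) (done ++ [piece], cuts)
     if p.1.getLast? = some [] then p.1.dropLast else p.1)
    = done ++ consOnto piece (splitRec toks (vc - 1 - cuts).toNat) := by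
  induction toks generalizing done piece cuts with
  | nil => simp [cntV] at h2; omega
  | cons t r ih =>
    simp only [List.foldl_cons, pvAppendLast_snoc]
    by_cases hv : (t.2 == "verb") = true
    · by_cases hc : cuts < vc - 1
      · -- cut here
        have hcnt : (cntV r : Int) = vc - (cuts + 1) := by
          simp only [cntV, List.countP_cons, hv, if_pos] at h2 ⊢; push_cast at h2 ⊢; omega
        have hc1 : cuts + 1 ≤ vc - 1 := by omega
        simp only [hv, hc, decide_true, Bool.and_self, if_true]
        have hstate : (done ++ [piece ++ [t]] ++ [[]] : List (List (String × String)))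
            = (done ++ [piece ++ [t]]) ++ [[]] := by simp
        rw [hstate, ih (done ++ [piece ++ [t]]) [] (cuts + 1) hc1 hcnt]
        rw [consOnto_nil _ (splitRec_ne_nil _ _)]
        have hk : (vc - 1 - cuts).toNat = (vc - 1 - (cuts + 1)).toNat + 1 := by omega
        rw [hk]
        have hs : splitRec (t :: r) ((vc - 1 - (cuts + 1)).toNat + 1)
            = [t] :: splitRec r (vc - 1 - (cuts + 1)).toNat := by
          simp [splitRec, hv]
        rw [hs]
        simp [consOnto]
      · -- budget exhausted: no more cuts at all
        have hd : decide (cuts < vc - 1) = false := by simpa using hc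
        simp only [hd, Bool.and_false, Bool.false_eq_true, if_false]
        rw [cutfold_nocut vc r done (piece ++ [t]) cuts (by omega)]
        have hk : (vc - 1 - cuts).toNat = 0 := by omega
        have hne : (piece ++ [t] ++ r : List (String × String)) ≠ [] := by simp
        simp only [hk]
        have hs : splitRec (t :: r) 0 = [t :: r] := rfl
        rw [hs]
        simp [consOnto]
    · -- not a verb
      have hcnt : (cntV r : Int) = vc - cuts := by
        simp only [cntV, List.countP_cons, hv] at h2 ⊢
        simpa using h2
      have hd : (t.2 == "verb" && decide (cuts < vc - 1)) = false := by
        simp [hv]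
      simp only [hd, Bool.false_eq_true, if_false]
      rw [ih done (piece ++ [t]) cuts h1 hcnt]
      congr 1
      rcases hk : (vc - 1 - cuts).toNat with _ | k
      · simp [splitRec, consOnto]
      · have hs : splitRec (t :: r) (k + 1) = consOnto [t] (splitRec r (k + 1)) := by
          simp [splitRec, hv]
        rw [hs, consOnto_consOnto]

theorem cutAfterVerbs_eq_splitRec (toks : List (String × String)) (h : 1 ≤ cntV toks) :
    cutAfterVerbs toks ((cntV toks : Int)) = splitRec toks (cntV toks - 1) := by
  have h' := cutfold_main ((cntV toks : Int)) toks [] [] 0 (by omega) (by omega)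
  simp only [List.nil_append] at h'
  unfold cutAfterVerbs
  rw [h', consOnto_nil _ (splitRec_ne_nil _ _)]
  congr 1
  omega

-- ---- B side: the cuts/slices computation is splitRec ----

-- verb positions, structurally
def vposN : List (String × String) → List Nat
  | [] => []
  | t :: r => if t.2 == "verb" then 0 :: (vposN r).map (· + 1) else (vposN r).map (· + 1)

theorem cntV_cons (t : String × String) (r : List (String × String)) :
    cntV (t :: r) = cntV r + if (t.2 == "verb") = true then 1 else 0 := by
  simp [cntV, List.countP_cons]

theorem length_vposN (toks : List (String × String)) : (vposN toks).length = cntV toks := by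
  induction toks with
  | nil => rfl
  | cons t r ih =>
    rw [cntV_cons]
    by_cases h : (t.2 == "verb") = true <;> simp [vposN, h, ih]

theorem enumerate_filter_verb (toks : List (String × String)) (s : Int) :
    ((PySem.List.enumerate toks s).filter (fun ip => ip.2.2 == "verb")).map (fun ip => ip.1)
    = (vposN toks).map (fun (n : Nat) => s + (n : Int)) := by
  induction toks generalizing s with
  | nil => simp [PySem.List.enumerate_nil, vposN]
  | cons t r ih =>
    rw [PySem.List.enumerate_cons]
    by_cases h : (t.2 == "verb") = true
    · rw [List.filter_cons_of_pos (by simpa using h)]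
      simp only [vposN, h, if_true, List.map_cons, ih (s + 1), List.map_map]
      congr 1
      · simp
      · apply List.map_congr_left; intro n _; simp; omega
    · rw [List.filter_cons_of_neg (by simpa using h)]
      simp only [vposN, h, Bool.false_eq_true, if_false, ih (s + 1), List.map_map]
      apply List.map_congr_left; intro n _; simp; omega

def cutsN (toks : List (String × String)) : List Nat :=
  0 :: ((vposN toks).dropLast.map (· + 1) ++ [toks.length])

def slicesAt (l : List (String × String)) (cuts : List Nat) :
    List (List (String × String)) :=
  (cuts.zip cuts.tail).map (fun ab => (l.drop ab.1).take (ab.2 - ab.1))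

def piecesN (toks : List (String × String)) : List (List (String × String)) :=
  slicesAt toks (cutsN toks)

theorem zip_tail_map {α β : Type} (f : α → β) (l : List α) :
    ((l.map f).zip (l.map f).tail) = (l.zip l.tail).map (fun p => (f p.1, f p.2)) := by
  rw [← List.map_tail, List.zip_map]
  rfl

-- slices of t :: r over shifted cuts = slices of r over the cuts
theorem slicesAt_shift (t : String × String) (r : List (String × String)) (cuts : List Nat) :
    slicesAt (t :: r) (cuts.map (· + 1)) = slicesAt r cuts := by
  unfold slicesAt
  rw [zip_tail_map, List.map_map]
  apply List.map_congr_left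
  intro ab _
  simp

theorem slicesAt_zero_cons (l : List (String × String)) (c : Nat) (cs : List Nat) :
    slicesAt l (0 :: c :: cs) = (l.take c) :: slicesAt l (c :: cs) := by
  simp [slicesAt, List.zip_cons_cons]

theorem cutsN_tail_ne_nil (toks : List (String × String)) : (cutsN toks).tail ≠ [] := by
  simp [cutsN]

-- splitRec on a non-verb head is consOnto, uniformly in k
theorem consOnto_splitRec_nonverb (t : String × String) (r : List (String × String)) (k : Nat)
    (hv : ¬ (t.2 == "verb") = true) :
    consOnto [t] (splitRec r k) = splitRec (t :: r) k := by
  cases k with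
  | zero => simp [splitRec, consOnto]
  | succ k => simp [splitRec, hv]

theorem piecesN_eq_splitRec (toks : List (String × String)) :
    piecesN toks = splitRec toks (cntV toks - 1) := by
  induction toks with
  | nil => rfl
  | cons t r ih =>
    by_cases hr : vposN r = []
    · -- no verb in r: a single piece on both sides
      have hc : cntV r = 0 := by simp [← length_vposN, hr]
      by_cases hv : (t.2 == "verb") = true
      · have hk : cntV (t :: r) - 1 = 0 := by rw [cntV_cons]; simp [hv]; omega
        rw [hk]
        simp [piecesN, slicesAt, cutsN, vposN, hv, hr, splitRec, List.zip_cons_cons]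
      · have hk : cntV (t :: r) - 1 = 0 := by rw [cntV_cons]; simp [hv]; omega
        rw [hk]
        simp [piecesN, slicesAt, cutsN, vposN, hv, hr, splitRec, List.zip_cons_cons]
    · have hc : 1 ≤ cntV r := by
        rw [← length_vposN]; exact List.length_pos_of_ne_nil hr
      have hm : (vposN r).map (· + 1) ≠ [] := by simp [hr]
      by_cases hv : (t.2 == "verb") = true
      · -- t is a verb: first piece is [t], the rest are r's pieces
        have hcut : cutsN (t :: r) = 0 :: (cutsN r).map (· + 1) := by
          simp only [cutsN, vposN, hv, if_true, List.dropLast_cons_of_ne_nil hm,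
            List.map_cons, List.map_append, List.map_map, List.length_cons,
            ← List.map_dropLast]
          rfl
        have hA : (cutsN r).map (· + 1)
            = 1 :: ((vposN r).dropLast.map (· + 1) ++ [r.length]).map (· + 1) := rfl
        unfold piecesN
        rw [hcut, hA, slicesAt_zero_cons, ← hA, slicesAt_shift]
        have hk : cntV (t :: r) - 1 = (cntV r - 1) + 1 := by
          rw [cntV_cons]; simp [hv]; omega
        rw [hk]
        have hsplit : splitRec (t :: r) ((cntV r - 1) + 1) = [t] :: splitRec r (cntV r - 1) := by
          simp [splitRec, hv]
        rw [hsplit, ← ih]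
        rfl
      · -- t is not a verb: it is prepended onto r's first piece
        have hcut : cutsN (t :: r) = 0 :: ((cutsN r).tail.map (· + 1)) := by
          simp only [cutsN, vposN, hv, Bool.false_eq_true, if_false, List.tail_cons,
            List.map_append, List.map_map, List.length_cons, ← List.map_dropLast]
          rfl
        have hk : cntV (t :: r) = cntV r := by rw [cntV_cons]; simp [hv]
        have hcr : cutsN r = 0 :: (cutsN r).tail := by simp [cutsN]
        rcases ht : (cutsN r).tail with _ | ⟨d, ds⟩
        · exact absurd ht (cutsN_tail_ne_nil r)
        · unfold piecesN
          rw [hcut, ht, List.map_cons, slicesAt_zero_cons]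
          have hX : ((d + 1) :: List.map (fun x => x + 1) ds : List Nat)
              = List.map (fun x => x + 1) (d :: ds) := rfl
          rw [hX, slicesAt_shift]
          rw [hk, ← consOnto_splitRec_nonverb t r (cntV r - 1) hv, ← ih]
          unfold piecesN
          conv_rhs => rw [hcr, ht]
          rw [slicesAt_zero_cons]
          simp [consOnto, List.take_succ_cons]

-- port-level B cuts/slices = piecesN
theorem alt_slices_eq_piecesN (toks : List (String × String)) :
    (let vpos := ((PySem.List.enumerate toks 0).filter (fun ip => ip.2.2 == "verb")).map (fun ip => ip.1)
     let cuts := [(0 : Int)] ++ vpos.dropLast.map (· + 1) ++ [(toks.length : Int)]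
     (cuts.zip (cuts.drop 1)).map (fun ab => PySem.List.slice toks (some ab.1) (some ab.2)))
    = piecesN toks := by
  have hvp : ((PySem.List.enumerate toks 0).filter (fun ip => ip.2.2 == "verb")).map (fun ip => ip.1)
      = (vposN toks).map (fun (n : Nat) => (n : Int)) := by
    rw [enumerate_filter_verb]
    apply List.map_congr_left; intro n _; simp
  simp only [hvp]
  have hswap : ∀ (l : List Nat), ((l.map (fun (n : Nat) => (n : Int))).map (· + 1))
      = ((l.map (· + 1)).map (fun (n : Nat) => (n : Int))) := by
    intro l
    rw [List.map_map, List.map_map]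
    apply List.map_congr_left; intro n _; simp
  have hcuts : [(0 : Int)] ++ (((vposN toks).map (fun (n : Nat) => (n : Int))).dropLast.map (· + 1)) ++ [(toks.length : Int)]
      = (cutsN toks).map (fun (n : Nat) => (n : Int)) := by
    simp only [cutsN, List.map_cons, List.map_append, ← List.map_dropLast, hswap]
    simp
  rw [hcuts, List.drop_one, zip_tail_map, List.map_map]
  unfold piecesN slicesAt
  apply List.map_congr_left
  intro ab _
  simpa using PySem.List.slice_natCast toks ab.1 ab.2

-- ---- grouping: B's bounds/slices = A's merge fold ----

def mergeA : List (List (String × String)) → List (List (String × String))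
  | [] => []
  | x :: xs => xs.foldl (fun acc s =>
      if pvContainsVerb s && pvContainsVerb (acc.getLast?.getD []) then acc ++ [s]
      else pvExtendLast acc s) [x]

def pairsOf (l : List Nat) : List (Nat × Nat) := l.zip l.tail

def groupToks (part : List (List (String × String))) (ab : Nat × Nat) :
    List (String × String) :=
  ((part.drop ab.1).take (ab.2 - ab.1)).flatMap id

theorem enumerate_append_singleton {α : Type} (l : List α) (x : α) (s : Int) :
    PySem.List.enumerate (l ++ [x]) s = PySem.List.enumerate l s ++ [(s + l.length, x)] := by
  induction l generalizing s with
  | nil => simp [PySem.List.enumerate_nil, PySem.List.enumerate_cons]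
  | cons y ys ih =>
    simp only [List.cons_append, PySem.List.enumerate_cons, ih (s + 1), List.length_cons]
    congr 2
    push_cast; ring

theorem pairsOf_append_last (l : List Nat) (x : Nat) (h : l ≠ []) :
    pairsOf (l ++ [x]) = pairsOf l ++ [(l.getLast h, x)] := by
  induction l with
  | nil => exact absurd rfl h
  | cons a as ih =>
    cases as with
    | nil => simp [pairsOf, List.zip_cons_cons]
    | cons b bs =>
      have hih := ih (by simp)
      have h1 : pairsOf ((a :: b :: bs) ++ [x]) = (a, b) :: pairsOf ((b :: bs) ++ [x]) := by
        simp [pairsOf, List.zip_cons_cons]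
      have h2 : pairsOf (a :: b :: bs) = (a, b) :: pairsOf (b :: bs) := by
        simp [pairsOf, List.zip_cons_cons]
      rw [h1, h2, hih]
      simp [List.getLast_cons]

theorem mem_pairsOf_left {ab : Nat × Nat} {l : List Nat} (h : ab ∈ pairsOf l) : ab.1 ∈ l :=
  (List.of_mem_zip (by simpa [pairsOf] using h)).1

theorem mem_pairsOf_right {ab : Nat × Nat} {l : List Nat} (h : ab ∈ pairsOf l) : ab.2 ∈ l :=
  List.mem_of_mem_tail (List.of_mem_zip (by simpa [pairsOf] using h)).2

theorem groupToks_snoc (ys : List (List (String × String))) (s : List (String × String))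
    (ab : Nat × Nat) (ha : ab.1 ≤ ys.length) (hb : ab.2 ≤ ys.length) :
    groupToks (ys ++ [s]) ab = groupToks ys ab := by
  unfold groupToks
  rw [List.drop_append_of_le_length ha,
    List.take_append_of_le_length (by simp; omega)]

theorem groupToks_last_snoc (ys : List (List (String × String))) (s : List (String × String))
    (a : Nat) (ha : a ≤ ys.length) :
    groupToks (ys ++ [s]) (a, ys.length + 1) = groupToks ys (a, ys.length) ++ s := by
  unfold groupToks
  rw [List.drop_append_of_le_length ha]
  have h1 : (ys.drop a ++ [s]).take (ys.length + 1 - a) = ys.drop a ++ [s] := by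
    apply List.take_of_length_le; simp; omega
  have h2 : (ys.drop a).take (ys.length - a) = ys.drop a := by
    apply List.take_of_length_le; simp
  rw [h1, h2, List.flatMap_append]
  simp

theorem groupToks_new (ys : List (List (String × String))) (s : List (String × String)) :
    groupToks (ys ++ [s]) (ys.length, ys.length + 1) = s := by
  unfold groupToks
  rw [List.drop_append_of_le_length (le_refl _)]
  simp

theorem mergeA_snoc (ys : List (List (String × String))) (hys : ys ≠ [])
    (s : List (String × String)) :
    mergeA (ys ++ [s])
      = if pvContainsVerb s && pvContainsVerb ((mergeA ys).getLast?.getD []) then mergeA ys ++ [s]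
        else pvExtendLast (mergeA ys) s := by
  cases ys with
  | nil => exact absurd rfl hys
  | cons y t => simp [mergeA, List.foldl_append]

theorem groups_inv (part : List (List (String × String))) (h : part ≠ []) :
    ∃ bdsN : List Nat, bdsN ≠ [] ∧ (∀ b ∈ bdsN, b ≤ part.length) ∧
      altBoundsCore (altFlags part)
        = (bdsN.map (fun (n : Nat) => (n : Int)), pvContainsVerb ((mergeA part).getLast?.getD [])) ∧
      (pairsOf (bdsN ++ [part.length])).map (groupToks part) = mergeA part := by
  induction part using List.reverseRecOn with
  | nil => exact absurd rfl h
  | append_singleton ys s ih =>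
    by_cases hys : ys = []
    · subst hys
      refine ⟨[0], by simp, by simp, ?_, ?_⟩
      · simp [altBoundsCore, altFlags, PySem.List.enumerate_cons, PySem.List.enumerate_nil,
          mergeA, pvContainsVerb_eq_any]
      · simp [pairsOf, List.zip_cons_cons, groupToks, mergeA]
    · obtain ⟨bdsN, hbne, hble, hcore, hmap⟩ := ih hys
      have hlen1 : 1 ≤ ys.length := List.length_pos_of_ne_nil hys
      -- one more step of the bounds fold
      have hcore' : altBoundsCore (altFlags (ys ++ [s]))
          = (let st := altBoundsCore (altFlags ys)
             ((if decide ((0 + ((ys.length : Nat) : Int)) > 0) && st.2 && s.any (fun wp => wp.2 == "verb")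
               then st.1 ++ [0 + ((ys.length : Nat) : Int)] else st.1),
              st.2 || s.any (fun wp => wp.2 == "verb"))) := by
        unfold altBoundsCore altFlags
        rw [List.map_append, List.map_cons, List.map_nil, enumerate_append_singleton,
          List.foldl_append, List.foldl_cons, List.foldl_nil, List.length_map]
      have hpos : decide ((0 + ((ys.length : Nat) : Int)) > 0) = true := by
        simp; omega
      -- the last merged group, explicitly
      have hpairs : pairsOf (bdsN ++ [ys.length])
          = pairsOf bdsN ++ [(bdsN.getLast hbne, ys.length)] := pairsOf_append_last _ _ hbne
      have hmap' : (pairsOf bdsN).map (groupToks ys)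
            ++ [groupToks ys (bdsN.getLast hbne, ys.length)] = mergeA ys := by
        have hmm := hmap
        rw [hpairs, List.map_append] at hmm
        simpa using hmm
      have hlastG : (mergeA ys).getLast?.getD [] = groupToks ys (bdsN.getLast hbne, ys.length) := by
        rw [← hmap']; simp
      have hseen : (altBoundsCore (altFlags ys)).2
          = pvContainsVerb (groupToks ys (bdsN.getLast hbne, ys.length)) := by
        rw [hcore, ← hlastG]
      have hf : pvContainsVerb s = s.any (fun wp => wp.2 == "verb") := pvContainsVerb_eq_any s
      have hlastle : bdsN.getLast hbne ≤ ys.length := hble _ (List.getLast_mem hbne)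
      by_cases hcond : (pvContainsVerb s && pvContainsVerb ((mergeA ys).getLast?.getD [])) = true
      · -- new group
        have hcondc := hcond
        rw [Bool.and_eq_true] at hcondc
        obtain ⟨hcs, hcM⟩ := hcondc
        have hany : (s.any fun wp => wp.2 == "verb") = true := by rw [← hf]; exact hcs
        refine ⟨bdsN ++ [ys.length], by simp, ?_, ?_, ?_⟩
        · intro b hb'
          rcases List.mem_append.1 hb' with h' | h'
          · have := hble _ h'; simp; omega
          · simp at h'; simp [h']
        · rw [hcore', mergeA_snoc ys hys s, if_pos hcond]
          simp [hcore, hcM, hany, hcs, List.map_append, hys]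
        · rw [mergeA_snoc ys hys s, if_pos hcond]
          have h1 : (ys ++ [s]).length = ys.length + 1 := by simp
          have hlast2 : (bdsN ++ [ys.length]) ≠ [] := by simp
          rw [h1, pairsOf_append_last _ _ hlast2, List.map_append]
          have hgl : (bdsN ++ [ys.length]).getLast hlast2 = ys.length := by simp
          rw [hgl]
          congr 1
          · -- prefix groups unchanged by the appended sentence
            rw [← hmap]
            apply List.map_congr_left
            intro ab hab
            have h1' := mem_pairsOf_left hab
            have h2' := mem_pairsOf_right hab
            have hle1 : ab.1 ≤ ys.length := by
              rcases List.mem_append.1 h1' with h' | h'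
              · exact hble _ h'
              · simp at h'; omega
            have hle2 : ab.2 ≤ ys.length := by
              rcases List.mem_append.1 h2' with h' | h'
              · exact hble _ h'
              · simp at h'; omega
            exact groupToks_snoc ys s ab hle1 hle2
          · simp [groupToks_new]
      · -- extend the last group
        have hcondF : (pvContainsVerb s && pvContainsVerb ((mergeA ys).getLast?.getD [])) = false :=
          Bool.eq_false_iff.mpr hcond
        have hbFg : (pvContainsVerb (groupToks ys (bdsN.getLast hbne, ys.length))
            && (s.any fun wp => wp.2 == "verb")) = false := by
          rw [← hf, Bool.and_comm, ← hlastG]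
          exact hcondF
        refine ⟨bdsN, hbne, ?_, ?_, ?_⟩
        · intro b hb'
          have := hble _ hb'; simp; omega
        · rw [hcore', mergeA_snoc ys hys s, if_neg (by simpa using hcond)]
          rw [← hmap', pvExtendLast_snoc]
          simp [hcore, hlastG, pvContainsVerb_append, ← hf]
          intro _ hg
          rw [hg, Bool.true_and] at hbFg
          rw [hf]
          exact hbFg
        · rw [mergeA_snoc ys hys s, if_neg (by simpa using hcond)]
          rw [← hmap', pvExtendLast_snoc]
          have h1 : (ys ++ [s]).length = ys.length + 1 := by simp
          rw [h1, pairsOf_append_last _ _ hbne, List.map_append]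
          congr 1
          · -- prefix groups unchanged
            apply List.map_congr_left
            intro ab hab
            exact groupToks_snoc ys s ab (hble _ (mem_pairsOf_left hab))
              (hble _ (mem_pairsOf_right hab))
          · simp [groupToks_last_snoc ys s _ hlastle]

-- per-group emission, A side and B side
def emitA (s : List (String × String)) : List (List (String × String)) :=
  if pvHowMany s > 1 then cutAfterVerbs s (pvHowMany s) else [s]

def emitB (toks0 : List (String × String)) : List (List (String × String)) :=
  -- 'toks[:-1] if toks[-1][1] == "conj" else toks' (same trim step as A: shared helper pvTrim;
    -- toks[-1] raises on [] in Python, outside Pre_)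
    let toks := pvTrim toks0
  let vpos := ((PySem.List.enumerate toks 0).filter (fun ip => ip.2.2 == "verb")).map (fun ip => ip.1)
  if 1 < vpos.length then
    let cuts := [(0 : Int)] ++ vpos.dropLast.map (· + 1) ++ [(toks.length : Int)]
    (cuts.zip (cuts.drop 1)).map (fun ab => PySem.List.slice toks (some ab.1) (some ab.2))
  else [toks]

theorem emit_eq (s : List (String × String)) : emitB s = emitA (pvTrim s) := by
  unfold emitB emitA
  have hlen : (((PySem.List.enumerate (pvTrim s) 0).filter (fun ip => ip.2.2 == "verb")).map (fun ip => ip.1)).length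
      = cntV (pvTrim s) := by
    rw [enumerate_filter_verb]; simp [length_vposN]
  have hmany : pvHowMany (pvTrim s) = (cntV (pvTrim s) : Int) := pvHowMany_eq_cntV (pvTrim s)
  by_cases h2 : 1 < cntV (pvTrim s)
  · rw [if_pos (by rw [hlen]; exact h2), if_pos (by rw [hmany]; omega)]
    rw [hmany, cutAfterVerbs_eq_splitRec (pvTrim s) (by omega), ← piecesN_eq_splitRec]
    exact alt_slices_eq_piecesN (pvTrim s)
  · rw [if_neg (by rw [hlen]; exact h2), if_neg (by rw [hmany]; omega)]

theorem alt_eq_flatMap (partition : List (List (String × String))) (hne : partition ≠ []) :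
    improvePartitioning_alt partition = (mergeA partition).flatMap emitB := by
  obtain ⟨bdsN, hbne, hble, hcore, hmap⟩ := groups_inv partition hne
  simp only [improvePartitioning_alt]
  rw [hcore]
  dsimp only
  have hb1 : (bdsN.map (fun (n : Nat) => (n : Int))) ++ [(partition.length : Int)]
      = (bdsN ++ [partition.length]).map (fun (n : Nat) => (n : Int)) := by simp
  rw [hb1, List.drop_one, zip_tail_map, List.foldl_map]
  refine Eq.trans (PySem.List.foldl_congr_mem' _ _
    (fun out ab => out ++ emitB (groupToks partition ab)) _ ?_) ?_
  · intro ab _ out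
    dsimp only
    rw [PySem.List.slice_natCast]
    simp only [emitB, groupToks]
    split_ifs <;> rfl
  · rw [PySem.List.foldl_append_eq_flatMap, List.nil_append, ← hmap]
    rw [List.flatMap_map]
    rfl

theorem a_eq_flatMap (partition : List (List (String × String))) (hne : partition ≠ []) :
    improvePartitioning partition = (mergeA partition).flatMap (fun s => emitA (pvTrim s)) := by
  obtain ⟨first, rest, rfl⟩ : ∃ f r, partition = f :: r := by
    cases partition with
    | nil => exact absurd rfl hne
    | cons f r => exact ⟨f, r, rfl⟩
  show solveProblem ((mergeA (first :: rest)).map pvTrim) = _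
  unfold solveProblem
  rw [List.foldl_map]
  refine Eq.trans (PySem.List.foldl_congr_mem' _ _
    (fun acc s => acc ++ emitA (pvTrim s)) _ ?_) ?_
  · intro s _ acc
    dsimp only
    simp only [emitA]
    split_ifs <;> rfl
  · rw [PySem.List.foldl_append_eq_flatMap, List.nil_append]

-- ===== VERDICT (by name: the statement is the Claim_ definition above) =====
theorem improvePartitioning_spec : Claim_equal_improvePartitioning := by
  intro partition _ hpre
  unfold Spec_improvePartitioning
  have hpre' : ∃ s ∈ partition, s ≠ [] := hpre
  have hne : partition ≠ [] := by
    rintro rfl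
    obtain ⟨s0, h0, -⟩ := hpre'
    simp at h0
  rw [a_eq_flatMap partition hne, alt_eq_flatMap partition hne]
  have hfun : (fun s => emitA (pvTrim s)) = emitB := funext fun s => (emit_eq s).symm
  rw [hfun]
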